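-- pv_equiv track=rewrite | github.com/SINHOLEE/Algorithm | 9월/서울2반9월17일/baby_gin.py | isTriple
-- ===== SOURCE A (Python) =====
-- def isTriple(counts):
--     for i in range(8):
--         cnt = 0
--         for j in range(3):
--             if counts[i+j] == 0:
--                 continue
--             else:
--                 cnt += 1
--         if cnt == 3:
--             return True
--     return False
-- ===== SOURCE B (Python) =====
-- def isTriple(counts):
--     run = 0
--     for i in range(10):
--         if counts[i] != 0:
--             run += 1
--             if run == 3:
--                 return True
--         else:
--             run = 0
--     return False
-- ===== Notes on version B (the rewrite author's own statement) =====
-- stated objective: simpler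
-- what changed: Replaces the nested 8x3 sliding-window scan with a single pass over indices 0..9 maintaining a run-length counter of consecutive nonzero entries.
import Mathlib
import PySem

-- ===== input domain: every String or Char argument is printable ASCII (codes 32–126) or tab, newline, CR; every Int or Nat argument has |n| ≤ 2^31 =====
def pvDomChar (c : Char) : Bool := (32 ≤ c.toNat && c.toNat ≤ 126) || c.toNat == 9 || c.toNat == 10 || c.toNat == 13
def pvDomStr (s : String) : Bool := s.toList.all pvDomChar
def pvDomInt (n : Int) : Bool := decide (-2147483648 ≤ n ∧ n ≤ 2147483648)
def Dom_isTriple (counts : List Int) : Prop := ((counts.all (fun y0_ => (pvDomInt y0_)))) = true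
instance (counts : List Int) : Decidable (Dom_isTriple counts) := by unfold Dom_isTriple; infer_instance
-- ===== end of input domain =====

-- B replaces A's nested 8x3 sliding-window scan with a single run-length pass over
-- indices 0..9 (objective: simpler).


-- ===== PORT A =====
-- inner 'for j in range(3)': counts[i+j] is PySem.List.pyGet?; Pre_ keeps every
-- accessed index in range, so the .getD 0 default is never the value used
def aCnt (counts : List Int) (i : Int) : Nat :=
  (PySem.List.pyRange 0 3 1).foldl
    (fun cnt j => if (PySem.List.pyGet? counts (i + j)).getD 0 == 0 then cnt else cnt + 1) 0

-- outer 'for i in range(8)' loop with early 'return True'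
def aLoop (counts : List Int) : List Int → Bool
  | [] => false
  | i :: rest => if aCnt counts i == 3 then true else aLoop counts rest

def isTriple (counts : List Int) : Bool :=
  aLoop counts (PySem.List.pyRange 0 8 1)

-- ===== PORT B =====
-- single pass over range(10) keeping 'run' = length of the current streak of nonzeros
def bLoop (counts : List Int) (run : Nat) : List Int → Bool
  | [] => false
  | i :: rest =>
    if (PySem.List.pyGet? counts i).getD 0 != 0 then
      if run + 1 == 3 then true else bLoop counts (run + 1) rest
    else bLoop counts 0 rest

def isTriple_alt (counts : List Int) : Bool :=
  bLoop counts 0 (PySem.List.pyRange 0 10 1)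

-- ===== PRECONDITION & SPEC =====
-- Pre_ excludes exactly the inputs where Python A raises IndexError: lists shorter
-- than 10 with no in-bounds window of three consecutive nonzero entries (Python B
-- raises IndexError on exactly the same inputs).
def Pre_isTriple (counts : List Int) : Prop :=
  10 ≤ counts.length ∨
    ∃ i < 8, i + 2 < counts.length ∧
      counts.getD i 0 ≠ 0 ∧ counts.getD (i + 1) 0 ≠ 0 ∧ counts.getD (i + 2) 0 ≠ 0
instance (counts : List Int) : Decidable (Pre_isTriple counts) := by
  unfold Pre_isTriple; infer_instance

def pvWitness_isTriple : List Int := [1, 0, 2, 0, 0, 3, 0, 1, 0, 0]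

def Spec_isTriple (counts : List Int) (out : Bool) : Prop := out = isTriple_alt counts
instance (counts : List Int) (out : Bool) : Decidable (Spec_isTriple counts out) := by
  unfold Spec_isTriple; infer_instance

-- ===== CLAIM (what is proved, stated in full; the proofs are below) =====
def Claim_equal_isTriple : Prop :=
  ∀ (counts : List Int), Dom_isTriple counts → Pre_isTriple counts →
    Spec_isTriple counts (isTriple counts)

-- ===== LEMMAS AND PROOFS =====
-- 'index k holds a nonzero entry' and 'a nonzero window of 3 starts at i'
def pvNz (counts : List Int) (k : Int) : Prop := (PySem.List.pyGet? counts k).getD 0 ≠ 0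
def pvWin (counts : List Int) (i : Int) : Prop :=
  pvNz counts i ∧ pvNz counts (i + 1) ∧ pvNz counts (i + 2)

theorem aLoop_any (counts : List Int) (l : List Int) :
    aLoop counts l = l.any (fun i => aCnt counts i == 3) := by
  induction l with
  | nil => rfl
  | cons x xs ih => simp [aLoop, ih]; cases h : aCnt counts x == 3 <;> simp_all

theorem aCnt_eq3 (counts : List Int) (i : Int) :
    ((aCnt counts i == 3) = true) ↔ pvWin counts i := by
  rw [aCnt, show PySem.List.pyRange 0 3 1 = [0, 1, 2] from by decide]
  simp only [List.foldl_cons, List.foldl_nil, add_zero, pvWin, pvNz, beq_iff_eq]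
  split_ifs with h1 h2 h3 h2 h3 h3 h3 <;> simp_all

-- loop invariant of B's pass: with 'run' nonzeros directly before index a, the scan of
-- range(a,b) succeeds iff some in-range window of 3 nonzeros starts at index ≥ a - run
theorem bLoop_iff (counts : List Int) (b : Int) :
    ∀ n : Nat, ∀ a : Int, ∀ run : Nat, run < 3 → (b - a).toNat = n →
    (∀ k : Int, a - run ≤ k → k < a → pvNz counts k) →
    ((bLoop counts run (PySem.List.pyRange a b 1) = true) ↔
      ∃ i : Int, a - run ≤ i ∧ i + 2 < b ∧ pvWin counts i) := by
  intro n
  induction n with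
  | zero =>
    intro a run hrun hn _
    have hba : b ≤ a := by omega
    rw [PySem.List.pyRange_one_eq_nil hba]
    simp only [bLoop, Bool.false_eq_true, false_iff]
    rintro ⟨i, h1, h2, -⟩
    omega
  | succ n ih =>
    intro a run hrun hn hstreak
    have hab : a < b := by omega
    rw [PySem.List.pyRange_one_cons hab]
    by_cases ha : pvNz counts a
    · have ha' : ((PySem.List.pyGet? counts a).getD 0 != 0) = true := by
        simpa [pvNz] using ha
      by_cases h3 : run + 1 = 3
      · simp only [bLoop, ha', if_pos, h3]
        simp only [beq_self_eq_true, if_true, true_iff]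
        refine ⟨a - 2, by omega, by omega, ?_, ?_, ?_⟩
        · exact hstreak (a - 2) (by omega) (by omega)
        · exact hstreak (a - 2 + 1) (by omega) (by omega)
        · simpa using ha
      · simp only [bLoop, ha', if_true]
        rw [if_neg (by simpa using h3)]
        rw [ih (a + 1) (run + 1) (by omega) (by omega)
          (by intro k hk1 hk2
              by_cases hka : k = a
              · simpa [hka] using ha
              · exact hstreak k (by omega) (by omega))]
        constructor
        · rintro ⟨i, h1, h2, hw⟩; exact ⟨i, by omega, h2, hw⟩
        · rintro ⟨i, h1, h2, hw⟩; exact ⟨i, by omega, h2, hw⟩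
    · have ha' : ((PySem.List.pyGet? counts a).getD 0 != 0) = false := by
        simpa [pvNz] using (not_not.mp (by simpa [pvNz] using ha))
      simp only [bLoop, ha', if_false, Bool.false_eq_true]
      rw [ih (a + 1) 0 (by omega) (by omega) (by intro k h1 h2; omega)]
      constructor
      · rintro ⟨i, h1, h2, hw⟩; exact ⟨i, by omega, h2, hw⟩
      · rintro ⟨i, h1, h2, hw⟩
        refine ⟨i, ?_, h2, hw⟩
        by_contra hi
        obtain ⟨w1, w2, w3⟩ := hw
        -- a window with i in [a - run, a] would contain index a, but counts[a] = 0
        have hcase : i = a ∨ i + 1 = a ∨ i + 2 = a := by omega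
        rcases hcase with h | h | h
        · exact ha (h ▸ w1)
        · exact ha (h ▸ w2)
        · exact ha (h ▸ w3)

-- the two ports agree on ALL inputs (both read list cells through .getD 0)
theorem isTriple_eq_alt (counts : List Int) : isTriple counts = isTriple_alt counts := by
  have hA : (isTriple counts = true) ↔ ∃ i : Int, 0 ≤ i ∧ i < 8 ∧ pvWin counts i := by
    rw [isTriple, aLoop_any]
    simp only [List.any_eq_true]
    constructor
    · rintro ⟨i, hmem, h3⟩
      have hm := (PySem.List.mem_pyRange_one).mp hmem
      exact ⟨i, hm.1, hm.2, (aCnt_eq3 _ _).mp h3⟩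
    · rintro ⟨i, h1, h2, hw⟩
      exact ⟨i, (PySem.List.mem_pyRange_one).mpr ⟨h1, h2⟩, (aCnt_eq3 _ _).mpr hw⟩
  have hB : (isTriple_alt counts = true) ↔
      ∃ i : Int, (0 : Int) - (0 : Nat) ≤ i ∧ i + 2 < 10 ∧ pvWin counts i :=
    bLoop_iff counts 10 10 0 0 (by omega) (by decide) (by intro k h1 h2; omega)
  have : (isTriple counts = true) ↔ (isTriple_alt counts = true) := by
    rw [hA, hB]
    constructor <;> rintro ⟨i, h1, h2, hw⟩ <;> exact ⟨i, by omega, by omega, hw⟩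
  cases h1 : isTriple counts <;> cases h2 : isTriple_alt counts <;> simp_all

-- ===== VERDICT (by name: the statement is the Claim_ definition above) =====
theorem isTriple_spec : Claim_equal_isTriple := by
  intro counts _ _
  unfold Spec_isTriple
  exact isTriple_eq_alt counts
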